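-- pv_equiv track=rewrite | github.com/ollyroberts/Project | refactored_code/refactored_code/core_functions.py | keychain_value_str
-- ===== SOURCE A (Python) =====
-- def keychain_value_str(key_provider, dict_values):
--     """
--     creates a dictionary where the list key providesr first nonwhitespace is
--      used as the key in this case it is the chain of the residue number. The
--       key value is made into string associated with each chain.
--     :param key_provider: takes the first character from key provider
--     :param dict_values: either res_no,pdbsecstr,res_type
--     :return:
--     """
--     counter = 0
--     new_dict = {}
--     for x in key_provider:
--         #   this checks if a chain exists and then adds secstr to a dictoinary
--         # of that chain letter for : secondary structutre, residue number and residue name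
--         if x[0] in new_dict:
--             new_dict[x[0]] += dict_values[counter]
--             counter += 1
--         else:
--             new_dict[x[0]] = dict_values[counter]
--             counter += 1
--     return new_dict
-- ===== SOURCE B (Python) =====
-- def keychain_value_str(key_provider, dict_values):
--     # Two-pass bucket-then-combine: group values into lists by first char,
--     # then concatenate each bucket (first value is the base, rest appended).
--     groups = {}
--     for i, x in enumerate(key_provider):
--         groups.setdefault(x[0], []).append(dict_values[i])
--     new_dict = {}
--     for k, vs in groups.items():
--         total = vs[0]
--         for v in vs[1:]:
--             total += v
--         new_dict[k] = total
--     return new_dict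
-- ===== Notes on version B (the rewrite author's own statement) =====
-- stated objective: alternative
-- what changed: Replaces A's single loop with a running string accumulation in the dict by a two-pass bucket-then-combine decomposition: group values into per-key lists, then reduce each bucket by concatenation with the first element as base.
import Mathlib
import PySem

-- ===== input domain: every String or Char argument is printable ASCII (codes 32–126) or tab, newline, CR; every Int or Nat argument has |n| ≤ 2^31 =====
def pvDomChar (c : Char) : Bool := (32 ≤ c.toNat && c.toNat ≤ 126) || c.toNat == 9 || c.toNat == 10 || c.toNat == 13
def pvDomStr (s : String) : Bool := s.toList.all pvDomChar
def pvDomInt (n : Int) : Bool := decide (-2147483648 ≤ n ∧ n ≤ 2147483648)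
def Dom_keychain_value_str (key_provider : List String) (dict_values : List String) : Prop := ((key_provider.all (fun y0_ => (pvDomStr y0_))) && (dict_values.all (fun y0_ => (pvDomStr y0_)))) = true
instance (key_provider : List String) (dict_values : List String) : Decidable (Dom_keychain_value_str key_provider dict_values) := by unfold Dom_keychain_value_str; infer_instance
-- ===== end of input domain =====

-- B replaces A's single running-accumulation loop by a two-pass bucket-then-combine
-- decomposition (group values into per-key lists, then reduce each bucket); same cost,
-- objective: alternative.  Equivalence is about the RETURN value.

-- ===== PORT A =====
-- x[0] as a one-character string (none = IndexError, excluded by Pre_)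
def pvKeyOf (x : String) : String := ((PySem.Str.pyGet? x 0).map Char.toString).getD ""
-- dict_values[i] (none = IndexError, excluded by Pre_)
def pvValOf (dict_values : List String) (i : Int) : String := (PySem.List.pyGet? dict_values i).getD ""

def keychain_value_str (key_provider : List String) (dict_values : List String) : List (String × String) :=
  ((key_provider.foldl
      (fun (st : Int × PySem.Dict String String) x =>
        if st.2.contains (pvKeyOf x) then
          (st.1 + 1, st.2.modify (pvKeyOf x) "" (· ++ pvValOf dict_values st.1))
        else
          (st.1 + 1, st.2.insert (pvKeyOf x) (pvValOf dict_values st.1)))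
      (0, PySem.Dict.empty)).2).items

-- ===== PORT B =====
-- functools-style reduce without an initial value: first element is the base
def pvReduceConcat (vs : List String) : String :=
  match vs with
  | [] => ""
  | v :: rest => rest.foldl (· ++ ·) v

def keychain_value_str_alt (key_provider : List String) (dict_values : List String) : List (String × String) :=
  let groups :=
    (PySem.List.enumerate key_provider).foldl
      (fun (g : PySem.Dict String (List String)) p =>
        g.modify (pvKeyOf p.2) [] (· ++ [pvValOf dict_values p.1]))
      PySem.Dict.empty
  groups.items.map (fun p => (p.1, pvReduceConcat p.2))

-- ===== PRECONDITION & SPEC =====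
-- Pre_ excludes exactly the inputs where the Python A raises IndexError:
-- an empty string in key_provider (x[0]) or dict_values shorter than key_provider.
def Pre_keychain_value_str (key_provider : List String) (dict_values : List String) : Prop :=
  (∀ x ∈ key_provider, x ≠ "") ∧ key_provider.length ≤ dict_values.length
instance (key_provider : List String) (dict_values : List String) : Decidable (Pre_keychain_value_str key_provider dict_values) := by unfold Pre_keychain_value_str; infer_instance

def pvWitness_keychain_value_str : List String × List String := (["A1", "B2", "A3"], ["x", "y", "z"])

def Spec_keychain_value_str (key_provider : List String) (dict_values : List String) (out : List (String × String)) : Prop := out = keychain_value_str_alt key_provider dict_values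
instance (key_provider : List String) (dict_values : List String) (out : List (String × String)) : Decidable (Spec_keychain_value_str key_provider dict_values out) := by unfold Spec_keychain_value_str; infer_instance

-- ===== CLAIM (what is proved, stated in full; the proofs are below) =====
def Claim_equal_keychain_value_str : Prop := ∀ (key_provider : List String) (dict_values : List String), Dom_keychain_value_str key_provider dict_values → Pre_keychain_value_str key_provider dict_values → Spec_keychain_value_str key_provider dict_values (keychain_value_str key_provider dict_values)

-- ===== LEMMAS AND PROOFS =====

-- the key/value pairs processed, in order, indices starting at c
def pvPairs (key_provider : List String) (dict_values : List String) (c : Int) : List (String × String) :=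
  (PySem.List.enumerate key_provider c).map (fun p => (pvKeyOf p.2, pvValOf dict_values p.1))

def pvConcat (vs : List String) : String := vs.foldl (· ++ ·) ""

theorem pv_foldl_append_assoc (l : List String) (a b : String) :
    l.foldl (· ++ ·) (a ++ b) = a ++ l.foldl (· ++ ·) b := by
  induction l generalizing b with
  | nil => rfl
  | cons x xs ih => simp [List.foldl, String.append_assoc, ih]

theorem pvReduceConcat_eq (vs : List String) : pvReduceConcat vs = pvConcat vs := by
  cases vs with
  | nil => rfl
  | cons v rest =>
    simp [pvReduceConcat, pvConcat, List.foldl]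

theorem pvConcat_cons (a : String) (l : List String) : pvConcat (a :: l) = a ++ pvConcat l := by
  have h : a = a ++ "" := by simp
  simp only [pvConcat, List.foldl]
  rw [show (("" : String) ++ a) = a ++ "" by simp, pv_foldl_append_assoc]

theorem pvPairs_cons (dv : List String) (x : String) (xs : List String) (c : Int) :
    pvPairs (x :: xs) dv c = (pvKeyOf x, pvValOf dv c) :: pvPairs xs dv (c + 1) := by
  simp [pvPairs, PySem.List.enumerate_cons]

theorem pvPairs_map_fst (kp dv : List String) (c : Int) :
    (pvPairs kp dv c).map (·.1) = kp.map pvKeyOf := by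
  induction kp generalizing c with
  | nil => simp [pvPairs, PySem.List.enumerate_nil]
  | cons x xs ih => simp [pvPairs_cons, ih]

-- the dict built by A's loop: lookups
theorem pvA_getD (dv : List String) (kp : List String) : ∀ (c : Int) (d : PySem.Dict String String) (k : String),
    ((kp.foldl
      (fun (st : Int × PySem.Dict String String) x =>
        if st.2.contains (pvKeyOf x) then
          (st.1 + 1, st.2.modify (pvKeyOf x) "" (· ++ pvValOf dv st.1))
        else
          (st.1 + 1, st.2.insert (pvKeyOf x) (pvValOf dv st.1)))
      (c, d)).2).getD k "" =
    d.getD k "" ++ pvConcat (((pvPairs kp dv c).filter (fun p => p.1 == k)).map (·.2)) := by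
  induction kp with
  | nil => intro c d k; simp [pvPairs, PySem.List.enumerate_nil, pvConcat]
  | cons x xs ih =>
    intro c d k
    simp only [List.foldl_cons]
    by_cases hc : d.contains (pvKeyOf x) = true
    · simp only [hc, if_pos]
      rw [ih]
      rw [PySem.Dict.getD_modify]
      rw [pvPairs_cons]
      by_cases hk : pvKeyOf x = k
      · subst hk
        simp [pvConcat_cons, String.append_assoc]
      · have : ¬ ((pvKeyOf x, pvValOf dv c).1 == k) = true := by simp [hk]
        simp only [List.filter_cons, this, if_neg, Bool.false_eq_true, not_false_iff]
        simp [Ne.symm hk]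
    · simp only [hc, if_neg, Bool.false_eq_true, not_false_iff]
      rw [ih]
      rw [PySem.Dict.getD_insert]
      rw [pvPairs_cons]
      by_cases hk : pvKeyOf x = k
      · subst hk
        have h0 : d.getD (pvKeyOf x) "" = "" := PySem.Dict.getD_of_not_contains d "" (by simpa using hc)
        simp [pvConcat_cons, h0]
      · have : ¬ ((pvKeyOf x, pvValOf dv c).1 == k) = true := by simp [hk]
        simp only [List.filter_cons, this, if_neg, Bool.false_eq_true, not_false_iff]
        simp [Ne.symm hk]

-- the dict built by A's loop: keys
theorem pvA_keys (dv : List String) (kp : List String) : ∀ (c : Int) (d : PySem.Dict String String),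
    ((kp.foldl
      (fun (st : Int × PySem.Dict String String) x =>
        if st.2.contains (pvKeyOf x) then
          (st.1 + 1, st.2.modify (pvKeyOf x) "" (· ++ pvValOf dv st.1))
        else
          (st.1 + 1, st.2.insert (pvKeyOf x) (pvValOf dv st.1)))
      (c, d)).2).keys = PySem.Set.update d.keys (kp.map pvKeyOf) := by
  induction kp with
  | nil => intro c d; simp [PySem.Set.update_nil]
  | cons x xs ih =>
    intro c d
    simp only [List.foldl_cons, List.map_cons, PySem.Set.update_cons]
    by_cases hc : d.contains (pvKeyOf x) = true
    · have hm : pvKeyOf x ∈ d.keys := (PySem.Dict.contains_iff_mem_keys d (pvKeyOf x)).1 hc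
      simp only [hc, if_pos]
      rw [ih]
      congr 1
      rw [PySem.Dict.keys_modify, PySem.Dict.keys_insert_of_contains d _ hc]
      simp [PySem.Set.add, hm]
    · have hm : pvKeyOf x ∉ d.keys := fun h => hc ((PySem.Dict.contains_iff_mem_keys d (pvKeyOf x)).2 h)
      simp only [hc, if_neg, Bool.false_eq_true, not_false_iff]
      rw [ih]
      congr 1
      rw [PySem.Dict.keys_insert_of_not_contains d _ (by simpa using hc)]
      simp [PySem.Set.add, hm]

-- B's grouping fold in canonical pair form
theorem pvB_groups (kp dv : List String) :
    (PySem.List.enumerate kp).foldl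
      (fun (g : PySem.Dict String (List String)) p =>
        g.modify (pvKeyOf p.2) [] (· ++ [pvValOf dv p.1]))
      PySem.Dict.empty =
    (pvPairs kp dv 0).foldl
      (fun (g : PySem.Dict String (List String)) p =>
        g.modify p.1 [] (· ++ [p.2]))
      PySem.Dict.empty := by
  rw [pvPairs, List.foldl_map]

-- ===== VERDICT (by name: the statement is the Claim_ definition above) =====
theorem keychain_value_str_spec : Claim_equal_keychain_value_str := by
  intro kp dv _ _
  unfold Spec_keychain_value_str keychain_value_str keychain_value_str_alt
  dsimp only
  rw [pvB_groups]
  set pairs := pvPairs kp dv 0 with hpairs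
  set g := pairs.foldl
      (fun (g : PySem.Dict String (List String)) p =>
        g.modify p.1 [] (· ++ [p.2])) PySem.Dict.empty with hg
  have hgkeys : g.keys = PySem.Set.ofList (kp.map pvKeyOf) := by
    rw [hg, PySem.Dict.keys_foldl_modify_key pairs (·.1) ([] : List String) _ PySem.Dict.empty]
    rw [pvPairs_map_fst]
    simp [PySem.Set.update_nil_left]
  have hggetD : ∀ k, g.getD k [] = (pairs.filter (fun p => p.1 == k)).map (·.2) := by
    intro k
    rw [hg, PySem.Dict.getD_foldl_modify_append]
    simp
  set dA := ((kp.foldl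
      (fun (st : Int × PySem.Dict String String) x =>
        if st.2.contains (pvKeyOf x) then
          (st.1 + 1, st.2.modify (pvKeyOf x) "" (· ++ pvValOf dv st.1))
        else
          (st.1 + 1, st.2.insert (pvKeyOf x) (pvValOf dv st.1)))
      (0, PySem.Dict.empty)).2) with hdA
  have hAkeys : dA.keys = PySem.Set.ofList (kp.map pvKeyOf) := by
    rw [hdA, pvA_keys]
    simp [PySem.Set.update_nil_left]
  have hAgetD : ∀ k, dA.getD k "" = pvConcat ((pairs.filter (fun p => p.1 == k)).map (·.2)) := by
    intro k
    rw [hdA, pvA_getD]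
    simp [hpairs]
  have hnodup : (PySem.Set.ofList (kp.map pvKeyOf)).Nodup := PySem.Set.nodup_ofList _
  rw [PySem.Dict.items_eq_map_keys dA (by rw [hAkeys]; exact hnodup) ""]
  rw [PySem.Dict.items_eq_map_keys g (by rw [hgkeys]; exact hnodup) []]
  rw [hAkeys, hgkeys, List.map_map]
  apply List.map_congr_left
  intro k _
  simp only [Function.comp]
  rw [hAgetD, hggetD, pvReduceConcat_eq]
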